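-- pv_equiv track=rewrite | github.com/MrBrantCode/unitest_baseline | mut_generate/mist_train_cf/cf_70831/solution.py | calculate_xor
-- ===== SOURCE A (Python) =====
-- def calculate_xor(array):
--     sum = 0
--     n = len(array)
--
--     for i in range(0,32):
--         cnt = 0
--         for j in range(0,n):
--             if((array[j] & (1 << i))):
--                cnt += 1
--
--         sum += cnt * (n-cnt) * 2
--     return sum
-- ===== SOURCE B (Python) =====
-- def calculate_xor(array):
--     total = 0
--     for x in array:
--         for y in array:
--             total += bin((x ^ y) & 0xFFFFFFFF).count('1')
--     return total
-- ===== Notes on version B (the rewrite author's own statement) =====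
-- stated objective: alternative
-- what changed: Replaces the per-bit transposition (for each of 32 bits count elements with the bit set and add cnt*(n-cnt)*2) by a direct double loop over all ordered pairs accumulating the popcount of the 32-bit-masked XOR of each pair.
import Mathlib
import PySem

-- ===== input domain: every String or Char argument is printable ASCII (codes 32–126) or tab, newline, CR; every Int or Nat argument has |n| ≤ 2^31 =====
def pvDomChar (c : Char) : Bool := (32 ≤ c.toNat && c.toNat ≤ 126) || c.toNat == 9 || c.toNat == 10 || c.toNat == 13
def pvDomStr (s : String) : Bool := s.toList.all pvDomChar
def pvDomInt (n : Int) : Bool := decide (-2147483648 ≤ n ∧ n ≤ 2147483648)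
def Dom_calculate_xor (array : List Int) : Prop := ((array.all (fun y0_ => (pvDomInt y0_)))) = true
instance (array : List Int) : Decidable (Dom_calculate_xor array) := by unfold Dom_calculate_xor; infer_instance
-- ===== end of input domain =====

-- B replaces A's per-bit transposition (count set bits per position, add cnt*(n-cnt)*2) by a double
-- loop over all ordered pairs summing the popcount of the 32-bit-masked XOR (alternative strategy, not faster).

-- ===== PORT A =====
def calculate_xor (array : List Int) : Int :=
  let sum : Int := 0
  let n : Int := (array.length : Int)
  (PySem.List.pyRange 0 32 1).foldl (fun sum i =>
    let cnt : Int :=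
      (PySem.List.pyRange 0 n 1).foldl (fun cnt j =>
        if PySem.Int.band (PySem.List.pyGetD array j 0) ((1 : Int) <<< i.toNat) ≠ 0 then cnt + 1 else cnt) 0
    sum + cnt * (n - cnt) * 2) sum

-- ===== PORT B =====
def calculate_xor_alt (array : List Int) : Int :=
  array.foldl (fun total x =>
    array.foldl (fun total y =>
      total + (PySem.Int.bitCount (PySem.Int.band (PySem.Int.bxor x y) 0xFFFFFFFF) : Int)) total) 0

-- ===== PRECONDITION & SPEC =====
def Spec_calculate_xor (array : List Int) (out : Int) : Prop := out = calculate_xor_alt array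
instance (array : List Int) (out : Int) : Decidable (Spec_calculate_xor array out) := by unfold Spec_calculate_xor; infer_instance

-- ===== CLAIM (what is proved, stated in full; the proofs are below) =====
def Claim_equal_calculate_xor : Prop := ∀ (array : List Int), Dom_calculate_xor array → Spec_calculate_xor array (calculate_xor array)

-- ===== LEMMAS AND PROOFS =====

def pvLow32 (x : Int) : Nat := (x % 4294967296).toNat
theorem pvLow32_lt (x : Int) : pvLow32 x < 4294967296 := by unfold pvLow32; omega
theorem pvLow32_nonneg (x : Int) (hx : 0 ≤ x) : pvLow32 x = x.toNat % 4294967296 := by unfold pvLow32; omega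
theorem pvLow32_neg (x : Int) (hx : x < 0) : pvLow32 x = 4294967295 - ((-x - 1).toNat % 4294967296) := by unfold pvLow32; omega
theorem pvComplPow (n : Nat) : ∀ m, m < 2^n → (2^n - 1) ^^^ m = 2^n - 1 - m := by
  induction n with
  | zero => intro m h; have : m = 0 := by omega
            subst this; rfl
  | succ n ih =>
    intro m h
    have hq : m / 2 < 2^n := by omega
    have h2 : (2:Nat)^(n+1) - 1 = Nat.bit true (2^n - 1) := by
      have := Nat.one_le_two_pow (n := n); simp [Nat.bit]; omega
    have h3 : m = Nat.bit (decide (m % 2 = 1)) (m / 2) := by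
      rcases Nat.mod_two_eq_zero_or_one m with hr | hr <;> simp [Nat.bit, hr] <;> omega
    rw [h2, h3, Nat.xor_bit, ih _ hq]
    have := Nat.one_le_two_pow (n := n)
    rcases Nat.mod_two_eq_zero_or_one m with hr | hr <;> simp [Nat.bit, hr] <;> omega

theorem pvTestBit_low32_nonneg (x : Int) (hx : 0 ≤ x) (i : Nat) (hi : i < 32) :
    (pvLow32 x).testBit i = x.toNat.testBit i := by
  rw [pvLow32_nonneg x hx, show (4294967296:Nat) = 2^32 from rfl, Nat.testBit_mod_two_pow]
  simp [hi]

theorem pvCompl (m : Nat) (h : m < 4294967296) : 4294967295 ^^^ m = 4294967295 - m :=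
  pvComplPow 32 m h

theorem pvMaskBit (j : Nat) (hj : j < 32) : Nat.testBit 4294967295 j = true := by
  rw [show (4294967295:Nat) = 2^32 - 1 from rfl, Nat.testBit_two_pow_sub_one]; simp [hj]

theorem pvModBit (m j : Nat) (hj : j < 32) : (m % 4294967296).testBit j = m.testBit j := by
  rw [show (4294967296:Nat) = 2^32 from rfl, Nat.testBit_mod_two_pow]; simp [hj]

theorem pvTestBit_low32_neg (x : Int) (hx : x < 0) (i : Nat) (hi : i < 32) :
    (pvLow32 x).testBit i = !((-x - 1).toNat.testBit i) := by
  rw [pvLow32_neg x hx, ← pvCompl _ (by omega), Nat.testBit_xor, pvMaskBit i hi, pvModBit _ i hi]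
  simp

theorem pvBandTest (x : Int) (i : Nat) (hi : i < 32) :
    (PySem.Int.band x ((1 : Int) <<< (i : Int)) ≠ 0) ↔ (pvLow32 x).testBit i = true := by
  have hs : ((1 : Int) <<< (i : Int)) = ((2 ^ i : Nat) : Int) := Int.one_shiftLeft i
  have hp : (0:Nat) < 2^i := Nat.two_pow_pos i
  rw [hs]
  by_cases hx : 0 ≤ x
  · rw [PySem.Int.band_of_nonneg hx (by positivity), Int.toNat_natCast, Nat.and_two_pow,
        pvTestBit_low32_nonneg x hx i hi]
    cases hb : x.toNat.testBit i <;> simp [hb] <;> try omega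
  · have hx' : x < 0 := by omega
    rw [pvTestBit_low32_neg x hx' i hi]
    simp only [PySem.Int.band, hx, if_false, (show (0:Int) ≤ ((2^i:Nat):Int) by positivity), if_true]
    rw [Int.toNat_natCast,
        show (2^i:Nat) &&& (-x-1).toNat = ((-x-1).toNat.testBit i).toNat * 2^i from by
          rw [Nat.land_comm]; exact Nat.and_two_pow _ i]
    cases hb : (-x-1).toNat.testBit i <;> simp [hb] <;> try omega
theorem pvAndMask (k : Nat) : 4294967295 &&& k = k % 4294967296 := by
  rw [Nat.land_comm, show (4294967295:Nat) = 2^32 - 1 from rfl,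
      Nat.and_two_pow_sub_one_eq_mod]

theorem pvMask (a : Int) : PySem.Int.band a 4294967295 = ((pvLow32 a : Nat) : Int) := by
  by_cases ha : 0 ≤ a
  · rw [PySem.Int.band_of_nonneg ha (by norm_num), show (4294967295:Int).toNat = 4294967295 from rfl,
        Nat.land_comm, pvAndMask, pvLow32_nonneg a ha]
  · simp only [PySem.Int.band, ha, if_false, show (0:Int) ≤ 4294967295 by norm_num, if_true]
    rw [show (4294967295:Int).toNat = 4294967295 from rfl, pvAndMask, pvLow32_neg a (by omega)]

theorem pvBit_bxor (x y : Int) (i : Nat) (hi : i < 32) :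
    (pvLow32 (PySem.Int.bxor x y)).testBit i
      = ((pvLow32 x).testBit i ^^ (pvLow32 y).testBit i) := by
  by_cases hx : 0 ≤ x <;> by_cases hy : 0 ≤ y
  · have hv : PySem.Int.bxor x y = ((x.toNat ^^^ y.toNat : Nat) : Int) := by
      simp only [PySem.Int.bxor, hx, hy, if_true]
    rw [hv, pvTestBit_low32_nonneg _ (by positivity) i hi, Int.toNat_natCast, Nat.testBit_xor,
        pvTestBit_low32_nonneg x hx i hi, pvTestBit_low32_nonneg y hy i hi]
  · have hv : PySem.Int.bxor x y = -((x.toNat ^^^ (-y - 1).toNat : Nat) : Int) - 1 := by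
      simp only [PySem.Int.bxor, hx, hy, if_true, if_false]
    rw [hv, pvTestBit_low32_neg _ (by omega) i hi,
        show -(-((x.toNat ^^^ (-y - 1).toNat : Nat) : Int) - 1) - 1 = ((x.toNat ^^^ (-y - 1).toNat : Nat) : Int) by ring,
        Int.toNat_natCast, Nat.testBit_xor,
        pvTestBit_low32_nonneg x hx i hi, pvTestBit_low32_neg y (by omega) i hi]
    cases x.toNat.testBit i <;> cases (-y - 1).toNat.testBit i <;> rfl
  · have hv : PySem.Int.bxor x y = -(((-x - 1).toNat ^^^ y.toNat : Nat) : Int) - 1 := by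
      simp only [PySem.Int.bxor, hx, hy, if_true, if_false]
    rw [hv, pvTestBit_low32_neg _ (by omega) i hi,
        show -(-(((-x - 1).toNat ^^^ y.toNat : Nat) : Int) - 1) - 1 = (((-x - 1).toNat ^^^ y.toNat : Nat) : Int) by ring,
        Int.toNat_natCast, Nat.testBit_xor,
        pvTestBit_low32_neg x (by omega) i hi, pvTestBit_low32_nonneg y hy i hi]
    cases (-x - 1).toNat.testBit i <;> cases y.toNat.testBit i <;> rfl
  · have hv : PySem.Int.bxor x y = (((-x - 1).toNat ^^^ (-y - 1).toNat : Nat) : Int) := by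
      simp only [PySem.Int.bxor, hx, hy, if_false]
    rw [hv, pvTestBit_low32_nonneg _ (by positivity) i hi, Int.toNat_natCast, Nat.testBit_xor,
        pvTestBit_low32_neg x (by omega) i hi, pvTestBit_low32_neg y (by omega) i hi]
    cases (-x - 1).toNat.testBit i <;> cases (-y - 1).toNat.testBit i <;> rfl
theorem pvBitCount_eq_sum (k : Nat) : ∀ m : Nat, m < 2 ^ k →
    PySem.Int.bitCount (m : Int) = ((List.range k).map (fun i => (m.testBit i).toNat)).sum := by
  induction k with
  | zero =>
    intro m h
    have : m = 0 := by omega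
    subst this; simp [PySem.Int.bitCount_zero]
  | succ k ih =>
    intro m h
    by_cases hm : m = 0
    · subst hm; simp [PySem.Int.bitCount_zero]
    · rw [PySem.Int.bitCount_natCast (by omega), ih (m / 2) (by omega),
          List.range_succ_eq_map]
      simp only [List.map_cons, List.map_map, List.sum_cons, Function.comp_def, Nat.succ_eq_add_one]
      have hb0 : (m.testBit 0).toNat = m % 2 := by
        rw [Nat.testBit_zero]; rcases Nat.mod_two_eq_zero_or_one m with hr | hr <;> simp [hr]
      have hbs : ∀ i, m.testBit (i + 1) = (m / 2).testBit i := by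
        intro i; rw [Nat.testBit_succ]
      simp only [hbs, hb0]

theorem pvSumSwap {α : Type} (l : List α) (k : Nat) (g : α → Nat → Int) :
    (l.map (fun x => ((List.range k).map (fun i => g x i)).sum)).sum
      = ((List.range k).map (fun i => (l.map (fun x => g x i)).sum)).sum := by
  induction l with
  | nil => simp
  | cons a l ih =>
    simp only [List.map_cons, List.sum_cons, ih, PySem.List.sum_map_add_int]

theorem pvSumToNat {α : Type} (l : List α) (q : α → Bool) :
    (l.map (fun y => ((q y).toNat : Int))).sum = (l.countP q : Int) := by
  induction l with
  | nil => simp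
  | cons a l ih =>
    cases hqa : q a <;> simp [List.countP_cons, hqa, ih] <;> push_cast <;> omega

theorem pvInner {α : Type} (l : List α) (p : α → Bool) (x : α) :
    (l.map (fun y => (((p x).xor (p y)).toNat : Int))).sum
      = if p x then (l.length : Int) - (l.countP p : Int) else (l.countP p : Int) := by
  have hlen := List.length_eq_countP_add_countP (p := p) (l := l)
  cases hpx : p x
  · simp only [hpx, Bool.false_xor, if_neg Bool.false_ne_true]
    exact pvSumToNat l p
  · simp only [hpx, Bool.true_xor, eq_self_iff_true, if_true]
    rw [pvSumToNat l (fun y => !p y)]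
    have hcc : List.countP (fun y => !p y) l = List.countP (fun a => decide ¬(p a = true)) l :=
      List.countP_congr (fun a _ => by cases p a <;> simp)
    omega

theorem pvOuter {α : Type} (l : List α) (p : α → Bool) (A B : Int) :
    (l.map (fun x => if p x then A else B)).sum
      = (l.countP p : Int) * A + ((l.length : Int) - (l.countP p : Int)) * B := by
  induction l with
  | nil => simp
  | cons a l ih =>
    cases hpa : p a <;> simp [List.countP_cons, hpa, ih] <;> push_cast <;> ring

theorem pvPair {α : Type} (l : List α) (p : α → Bool) :
    (l.map (fun x => (l.map (fun y => (((p x).xor (p y)).toNat : Int))).sum)).sum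
      = (l.countP p : Int) * ((l.length : Int) - (l.countP p : Int)) * 2 := by
  have h1 : ∀ x ∈ l, (l.map (fun y => (((p x).xor (p y)).toNat : Int))).sum
      = if p x then (l.length : Int) - (l.countP p : Int) else (l.countP p : Int) :=
    fun x _ => pvInner l p x
  rw [List.map_congr_left h1, pvOuter]
  ring

theorem pvA_char (array : List Int) :
    calculate_xor array
      = ((List.range 32).map (fun i =>
          (array.countP (fun x => (pvLow32 x).testBit i) : Int)
            * ((array.length : Int) - (array.countP (fun x => (pvLow32 x).testBit i) : Int)) * 2)).sum := by
  simp only [calculate_xor]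
  rw [PySem.List.pyRange_one 0 32, show ((32 : Int) - 0).toNat = 32 from rfl, List.foldl_map,
      PySem.List.foldl_add, zero_add]
  apply congrArg
  apply List.map_congr_left
  intro k hk
  rw [List.mem_range] at hk
  simp only [zero_add, Int.toNat_natCast]
  rw [PySem.List.foldl_pyRange_zero_pyGetD' array 0
        (fun cnt v => if PySem.Int.band v ((1 : Int) <<< (k : Int)) ≠ 0 then cnt + 1 else cnt) 0,
      PySem.List.foldl_ite_add_one (fun v => PySem.Int.band v ((1 : Int) <<< (k : Int)) ≠ 0) array 0,
      zero_add]
  have hc : List.countP (fun x => decide (PySem.Int.band x ((1 : Int) <<< (k : Int)) ≠ 0)) array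
      = List.countP (fun x => (pvLow32 x).testBit k) array := by
    apply List.countP_congr
    intro x _
    have h2 := pvBandTest x k hk
    cases hb : (pvLow32 x).testBit k
    · rw [hb] at h2
      simp only [Bool.false_eq_true, iff_false, not_not] at h2
      simp [h2]
    · rw [hb] at h2
      simp [h2.mpr rfl]
  rw [hc]

theorem pvB_char (array : List Int) :
    calculate_xor_alt array
      = ((List.range 32).map (fun i =>
          (array.countP (fun x => (pvLow32 x).testBit i) : Int)
            * ((array.length : Int) - (array.countP (fun x => (pvLow32 x).testBit i) : Int)) * 2)).sum := by
  simp only [calculate_xor_alt]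
  simp only [PySem.List.foldl_add, zero_add]
  have hpc : ∀ x y : Int,
      (PySem.Int.bitCount (PySem.Int.band (PySem.Int.bxor x y) 0xFFFFFFFF) : Int)
        = ((List.range 32).map (fun i =>
            ((((pvLow32 x).testBit i).xor ((pvLow32 y).testBit i)).toNat : Int))).sum := by
    intro x y
    rw [pvMask, pvBitCount_eq_sum 32 _ (pvLow32_lt _), Nat.cast_list_sum, List.map_map]
    apply congrArg
    apply List.map_congr_left
    intro i hi
    rw [List.mem_range] at hi
    simp [pvBit_bxor x y i hi]
  rw [show (array.map (fun x => (array.map (fun y =>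
        (PySem.Int.bitCount (PySem.Int.band (PySem.Int.bxor x y) 0xFFFFFFFF) : Int))).sum))
      = array.map (fun x => (array.map (fun y => ((List.range 32).map (fun i =>
          ((((pvLow32 x).testBit i).xor ((pvLow32 y).testBit i)).toNat : Int))).sum)).sum)
    from List.map_congr_left (fun x _ => congrArg _ (List.map_congr_left (fun y _ => hpc x y)))]
  rw [show (array.map (fun x => (array.map (fun y => ((List.range 32).map (fun i =>
          ((((pvLow32 x).testBit i).xor ((pvLow32 y).testBit i)).toNat : Int))).sum)).sum))
        = array.map (fun x => ((List.range 32).map (fun i => (array.map (fun y =>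
          ((((pvLow32 x).testBit i).xor ((pvLow32 y).testBit i)).toNat : Int))).sum)).sum)
      from List.map_congr_left (fun x _ => pvSumSwap array 32 _)]
  rw [pvSumSwap array 32 _]
  apply congrArg
  apply List.map_congr_left
  intro i _
  exact pvPair array (fun x => (pvLow32 x).testBit i)

-- ===== VERDICT (by name: the statement is the Claim_ definition above) =====
theorem calculate_xor_spec : Claim_equal_calculate_xor := by
  intro array _
  unfold Spec_calculate_xor
  rw [pvA_char, pvB_char]
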